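-- pv_equiv track=rewrite | github.com/BBCBB/DC-TEP-with-New-Bus | code/DC_TEP_Solver.py | get_cycle_nodes
-- ===== SOURCE A (Python) =====
-- def get_cycle_nodes(edges):
--     """Reconstruct ordered node list [v0, ..., vk, v0] from cycle edge set."""
--     nbr = {}
--     for a, b in edges:
--         nbr.setdefault(a, []).append(b)
--         nbr.setdefault(b, []).append(a)
--     start = edges[0][0]
--     prev  = start
--     curr  = nbr[start][0]
--     cycle = [start]
--     while curr != start:
--         cycle.append(curr)
--         n0, n1 = nbr[curr][0], nbr[curr][1]
--         prev, curr = curr, (n0 if n0 != prev else n1)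
--     cycle.append(start)
--     return cycle
-- ===== SOURCE B (Python) =====
-- def get_cycle_nodes(edges):
--     """Reconstruct ordered node list [v0, ..., vk, v0] from cycle edge set."""
--     start, curr = edges[0]
--     rem = list(edges[1:])
--     cycle = [start]
--     while curr != start:
--         cycle.append(curr)
--         i = next(j for j, (a, b) in enumerate(rem) if a == curr or b == curr)
--         a, b = rem.pop(i)
--         curr = b if a == curr else a
--     cycle.append(start)
--     return cycle
-- ===== Notes on version B (the rewrite author's own statement) =====
-- stated objective: alternative
-- what changed: B drops A's adjacency dict and prev-node-avoidance entirely: it consumes the edge list destructively, at each step extracting (removing) the first remaining edge incident to the current node and crossing it, so the 'do not go back' rule is enforced by edge deletion instead of comparing against the previous node.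
-- outside the precondition, e.g. on get_cycle_nodes([(0, 1), (1, 2), (2, 3), (3, 1)]): A returns [0, 1, 2, 3, 1, 0], B raises StopIteration
import Mathlib
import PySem

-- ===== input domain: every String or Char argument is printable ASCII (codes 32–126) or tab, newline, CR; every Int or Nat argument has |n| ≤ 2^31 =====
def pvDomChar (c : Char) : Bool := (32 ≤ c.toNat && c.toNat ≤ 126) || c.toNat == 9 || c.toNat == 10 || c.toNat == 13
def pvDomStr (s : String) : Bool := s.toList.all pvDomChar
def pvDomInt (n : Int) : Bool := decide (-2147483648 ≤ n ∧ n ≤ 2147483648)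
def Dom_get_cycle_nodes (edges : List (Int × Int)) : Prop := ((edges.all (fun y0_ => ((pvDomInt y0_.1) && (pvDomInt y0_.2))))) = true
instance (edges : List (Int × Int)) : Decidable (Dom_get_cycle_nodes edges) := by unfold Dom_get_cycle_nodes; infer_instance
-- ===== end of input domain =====

-- B replaces A's adjacency-dict prev-avoiding walk by a destructive walk: each traversed
-- edge is REMOVED from the remaining edge list and the next step crosses the first
-- remaining edge incident to the current node (alternative algorithm; no dict, no prev).

-- ===== PORT A =====
-- nbr.setdefault(x, []).append(y) is Dict.modify x [] (· ++ [y]) (d[x] = d.get(x, []) + [y],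
-- new keys appended at the end, exactly like setdefault)
def pvBuildNbr (edges : List (Int × Int)) : PySem.Dict Int (List Int) :=
  edges.foldl
    (fun d p => (d.modify p.1 [] (· ++ [p.2])).modify p.2 [] (· ++ [p.1]))
    PySem.Dict.empty

-- the while-loop, with fuel. A terminating run of the Python loop never repeats a
-- (prev, curr) state, so it performs at most (2*|edges|+2)^2 iterations: with that fuel
-- the port returns exactly what the Python returns whenever the Python returns (where
-- the Python raises KeyError/IndexError or loops forever, the port's .getD junk values
-- and fuel exhaustion are unclaimed)
def pvLoopA (nbr : PySem.Dict Int (List Int)) (start : Int) :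
    Nat → Int → Int → List Int → List Int
  | 0, _, _, cycle => cycle ++ [start]
  | fuel + 1, prev, curr, cycle =>
    if curr = start then cycle ++ [start]
    else
      let n0 := (PySem.List.pyGet? (nbr.getD curr []) 0).getD 0
      let n1 := (PySem.List.pyGet? (nbr.getD curr []) 1).getD 0
      pvLoopA nbr start fuel curr (if n0 ≠ prev then n0 else n1) (cycle ++ [curr])

def get_cycle_nodes (edges : List (Int × Int)) : List Int :=
  match edges with
  | [] => []  -- Python raises IndexError on edges[0]; unclaimed
  | (a, _) :: _ =>
    let nbr := pvBuildNbr edges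
    let start := a
    let curr := (PySem.List.pyGet? (nbr.getD start []) 0).getD 0
    pvLoopA nbr start ((2 * edges.length + 2) * (2 * edges.length + 2)) start curr [start]

-- ===== PORT B =====
-- Source B's inner scan: the first edge of rem incident to curr, paired with rem after
-- rem.pop(i) of that edge (none = Python's StopIteration)
def pvExtract (curr : Int) : List (Int × Int) → Option ((Int × Int) × List (Int × Int))
  | [] => none
  | e :: t =>
    if e.1 = curr ∨ e.2 = curr then some (e, t)
    else (pvExtract curr t).map (fun fr => (fr.1, e :: fr.2))

-- Source B's while-loop over (curr, rem), with the same fuel bound as port A (same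
-- unclaimed-input caveat; the 'none' branch is where the Python raises StopIteration)
def pvLoopB (start : Int) : Nat → Int → List (Int × Int) → List Int → List Int
  | 0, _, _, cycle => cycle ++ [start]
  | fuel + 1, curr, rem, cycle =>
    if curr = start then cycle ++ [start]
    else
      match pvExtract curr rem with
      | none => cycle ++ [curr]
      | some (e, rem') =>
        pvLoopB start fuel (if e.1 = curr then e.2 else e.1) rem' (cycle ++ [curr])

def get_cycle_nodes_alt (edges : List (Int × Int)) : List Int :=
  match edges with
  | [] => []  -- Python raises IndexError unpacking edges[0]; unclaimed
  | (start, c0) :: rest =>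
    pvLoopB start ((2 * edges.length + 2) * (2 * edges.length + 2)) c0 rest [start]

-- ===== PRECONDITION & SPEC =====
-- the neighbour list of v, in A's dict order: one entry per incidence, in edge-list order
def pvNbrs (v : Int) (edges : List (Int × Int)) : List Int :=
  edges.flatMap (fun p => (if p.1 = v then [p.2] else []) ++ (if p.2 = v then [p.1] else []))

-- degree of v counted with multiplicity (a self-loop counts twice)
def pvDeg (edges : List (Int × Int)) (v : Int) : Nat :=
  (edges.map (fun p => (if p.1 = v then 1 else 0) + (if p.2 = v then 1 else 0))).sum

-- Pre_ is a region on which A provably terminates: the first edge is a self-loop (A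
-- returns [a, a] at once); or the first two edges incident to the second endpoint of
-- edge 0 both lead back to its first endpoint (A returns [a, b, a]); or every node has
-- degree exactly 2 counted with multiplicity (a disjoint union of cycles — the
-- function's documented domain). Outside Pre_ A either fails to return (infinite loop,
-- IndexError/KeyError) or returns an accidental walk over a non-cycle input on which
-- B's destructive scan instead exhausts the edges and raises StopIteration — see cites.
def Pre_get_cycle_nodes (edges : List (Int × Int)) : Prop :=
  edges ≠ [] ∧
  ((edges.head?.any fun p => p.1 == p.2) = true ∨
   (edges.head?.any fun p => (pvNbrs p.2 edges).take 2 == [p.1, p.1]) = true ∨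
   (∀ p ∈ edges, pvDeg edges p.1 = 2 ∧ pvDeg edges p.2 = 2))

instance (edges : List (Int × Int)) : Decidable (Pre_get_cycle_nodes edges) := by
  unfold Pre_get_cycle_nodes; infer_instance

def pvWitness_get_cycle_nodes : (List (Int × Int)) := [(1, 2), (2, 3), (3, 1)]

def Spec_get_cycle_nodes (edges : List (Int × Int)) (out : List Int) : Prop :=
  out = get_cycle_nodes_alt edges
instance (edges : List (Int × Int)) (out : List Int) : Decidable (Spec_get_cycle_nodes edges out) := by
  unfold Spec_get_cycle_nodes; infer_instance

-- ===== CLAIM (what is proved, stated in full; the proofs are below) =====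
def Claim_equal_get_cycle_nodes : Prop :=
  ∀ (edges : List (Int × Int)), Dom_get_cycle_nodes edges → Pre_get_cycle_nodes edges →
    Spec_get_cycle_nodes edges (get_cycle_nodes edges)

-- ===== LEMMAS AND PROOFS =====

-- A's step function: what the body of A's loop assigns to curr
def pvStep (edges : List (Int × Int)) (prev curr : Int) : Int :=
  let ns := pvNbrs curr edges
  let n0 := (PySem.List.pyGet? ns 0).getD 0
  let n1 := (PySem.List.pyGet? ns 1).getD 0
  if n0 ≠ prev then n0 else n1

theorem pvNbrs_cons (v : Int) (p : Int × Int) (rest : List (Int × Int)) :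
    pvNbrs v (p :: rest) =
      ((if p.1 = v then [p.2] else []) ++ (if p.2 = v then [p.1] else [])) ++ pvNbrs v rest := by
  simp [pvNbrs]

theorem pvNbrs_append (v : Int) (l1 l2 : List (Int × Int)) :
    pvNbrs v (l1 ++ l2) = pvNbrs v l1 ++ pvNbrs v l2 := by
  simp [pvNbrs]

theorem pvNbrs_length (v : Int) (edges : List (Int × Int)) :
    (pvNbrs v edges).length = pvDeg edges v := by
  induction edges with
  | nil => rfl
  | cons p rest ih =>
    rw [pvNbrs_cons]
    simp only [pvDeg, List.map_cons, List.sum_cons, List.length_append] at *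
    rw [ih]
    by_cases h1 : p.1 = v <;> by_cases h2 : p.2 = v <;> simp [h1, h2] <;> omega

theorem pvStep_getD (d : PySem.Dict Int (List Int)) (p : Int × Int) (v : Int) :
    ((d.modify p.1 [] (· ++ [p.2])).modify p.2 [] (· ++ [p.1])).getD v []
      = d.getD v [] ++ ((if p.1 = v then [p.2] else []) ++ (if p.2 = v then [p.1] else [])) := by
  rw [PySem.Dict.getD_modify, PySem.Dict.getD_modify]
  by_cases h1 : v = p.2 <;> by_cases h2 : v = p.1 <;> by_cases h3 : p.2 = p.1 <;>
    simp_all [PySem.Dict.getD_modify] <;> omega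

theorem pvBuildNbr_getD_aux (edges : List (Int × Int)) (d : PySem.Dict Int (List Int)) (v : Int) :
    (edges.foldl (fun d p => (d.modify p.1 [] (· ++ [p.2])).modify p.2 [] (· ++ [p.1])) d).getD v []
      = d.getD v [] ++ pvNbrs v edges := by
  induction edges generalizing d with
  | nil => simp [pvNbrs]
  | cons p rest ih =>
    rw [List.foldl_cons, ih, pvNbrs_cons, pvStep_getD, List.append_assoc]

-- A's dict lookup is the incidence list
theorem pvLookup_eq (edges : List (Int × Int)) (v : Int) :
    (pvBuildNbr edges).getD v [] = pvNbrs v edges := by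
  rw [pvBuildNbr, pvBuildNbr_getD_aux, PySem.Dict.getD_empty, List.nil_append]

theorem pvGet_zero (x : Int) (t : List Int) :
    (PySem.List.pyGet? (x :: t) 0).getD 0 = x := by
  simp [PySem.List.pyGet?, PySem.List.pyIdx?]

theorem pvGet_one (x y : Int) (t : List Int) :
    (PySem.List.pyGet? (x :: y :: t) 1).getD 0 = y := by
  simp [PySem.List.pyGet?, PySem.List.pyIdx?]

-- both loops are stationary once curr = start, whatever the fuel
theorem pvLoopA_start (nbr : PySem.Dict Int (List Int)) (start : Int) (fuel : Nat)
    (prev : Int) (cycle : List Int) :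
    pvLoopA nbr start fuel prev start cycle = cycle ++ [start] := by
  cases fuel <;> simp [pvLoopA]

theorem pvLoopB_start (start : Int) (fuel : Nat) (rem : List (Int × Int)) (cycle : List Int) :
    pvLoopB start fuel start rem cycle = cycle ++ [start] := by
  cases fuel <;> simp [pvLoopB]

-- pvExtract finds the FIRST incident edge: the split characterisation
theorem pvExtract_spec (c : Int) (rem : List (Int × Int)) (h : pvNbrs c rem ≠ []) :
    ∃ L1 e L2, rem = L1 ++ e :: L2 ∧ pvExtract c rem = some (e, L1 ++ L2) ∧
      (e.1 = c ∨ e.2 = c) ∧ pvNbrs c L1 = [] := by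
  induction rem with
  | nil => simp [pvNbrs] at h
  | cons f t ih =>
    by_cases hf : f.1 = c ∨ f.2 = c
    · exact ⟨[], f, t, rfl, by simp [pvExtract, hf], hf, rfl⟩
    · push_neg at hf
      have hN : pvNbrs c (f :: t) = pvNbrs c t := by
        rw [pvNbrs_cons]; simp [hf.1, hf.2]
      obtain ⟨L1, e, L2, hsplit, hext, hinc, hL1⟩ := ih (by rw [← hN]; exact h)
      refine ⟨f :: L1, e, L2, by simp [hsplit], ?_, hinc, ?_⟩
      · have hnf : ¬ (f.1 = c ∨ f.2 = c) := by push_neg; exact hf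
        simp [pvExtract, hnf, hext]
      · rw [pvNbrs_cons]; simp [hf.1, hf.2, hL1]

-- an incident edge in the list makes the incidence list nonempty
theorem pvNbrs_ne_nil_of_mem (v : Int) (e : Int × Int) (rem : List (Int × Int))
    (hm : e ∈ rem) (hinc : e.1 = v ∨ e.2 = v) : pvNbrs v rem ≠ [] := by
  obtain ⟨l1, l2, rfl⟩ := List.append_of_mem hm
  rw [pvNbrs_append, pvNbrs_cons]
  rcases hinc with h | h <;> simp [h]

-- the simulation: with the invariant, A's loop and B's loop return the same list
theorem pvLoop_eq (edges : List (Int × Int))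
    (H : ∀ p ∈ edges, pvDeg edges p.1 = 2 ∧ pvDeg edges p.2 = 2) (start : Int) :
    ∀ (fuel : Nat) (prev curr : Int) (rem : List (Int × Int)) (cycle : List Int),
      (curr = start ∨ (curr ≠ start ∧ rem.Sublist edges ∧
        pvNbrs curr rem = [pvStep edges prev curr] ∧
        ∀ v : Int, v ≠ curr → v ≠ start → (pvNbrs v rem = pvNbrs v edges ∨ pvNbrs v rem = []))) →
      pvLoopA (pvBuildNbr edges) start fuel prev curr cycle = pvLoopB start fuel curr rem cycle := by
  intro fuel
  induction fuel with
  | zero => intro prev curr rem cycle _; rfl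
  | succ f ih =>
    intro prev curr rem cycle hinv
    rcases hinv with hc | ⟨hc, hsub, hone, hrest⟩
    · subst hc; rw [pvLoopA_start, pvLoopB_start]
    · have hne : pvNbrs curr rem ≠ [] := by rw [hone]; simp
      obtain ⟨L1, e, L2, hsplit, hext, hinc, hL1⟩ := pvExtract_spec curr rem hne
      set x := pvStep edges prev curr with hxdef
      -- the single remaining incidence of curr goes through e, with endpoint x
      have hkey : ((if e.1 = curr then [e.2] else []) ++ (if e.2 = curr then [e.1] else [])) ++ pvNbrs curr L2 = [x] := by
        have hdecomp : pvNbrs curr rem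
            = pvNbrs curr L1 ++ (((if e.1 = curr then [e.2] else []) ++ (if e.2 = curr then [e.1] else [])) ++ pvNbrs curr L2) := by
          rw [hsplit, pvNbrs_append, pvNbrs_cons]
        rw [hdecomp, hL1, List.nil_append] at hone
        exact hone
      have hmain : (if e.1 = curr then e.2 else e.1) = x ∧ x ≠ curr ∧ pvNbrs curr L2 = [] := by
        by_cases h1 : e.1 = curr <;> by_cases h2 : e.2 = curr
        · exfalso; rw [if_pos h1, if_pos h2] at hkey; simp at hkey
        · rw [if_pos h1] at hkey ⊢
          rw [if_neg h2, List.append_nil, List.singleton_append, List.cons.injEq] at hkey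
          refine ⟨hkey.1, ?_, hkey.2⟩
          rw [← hkey.1]; exact h2
        · rw [if_neg h1] at hkey ⊢
          rw [if_pos h2, List.nil_append, List.singleton_append, List.cons.injEq] at hkey
          refine ⟨hkey.1, ?_, hkey.2⟩
          rw [← hkey.1]; exact h1
        · exfalso; rcases hinc with h | h; exact h1 h; exact h2 h
      obtain ⟨hBnext, hxc, hL2⟩ := hmain
      have hememrem : e ∈ rem := by rw [hsplit]; simp
      have heM : e ∈ edges := hsub.mem hememrem
      -- unfold one step of A (curr ≠ start), rewriting the dict lookup
      have hA : pvLoopA (pvBuildNbr edges) start (f + 1) prev curr cycle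
          = pvLoopA (pvBuildNbr edges) start f curr x (cycle ++ [curr]) := by
        rw [pvLoopA, if_neg hc]
        simp only [pvLookup_eq]
        rw [hxdef, pvStep]
      have hB : pvLoopB start (f + 1) curr rem cycle
          = pvLoopB start f x (L1 ++ L2) (cycle ++ [curr]) := by
        rw [pvLoopB, if_neg hc, hext]
        show pvLoopB start f (if e.1 = curr then e.2 else e.1) (L1 ++ L2) (cycle ++ [curr]) = _
        rw [hBnext]
      rw [hA, hB]
      apply ih
      by_cases hxs : x = start
      · exact Or.inl hxs
      · refine Or.inr ⟨hxs, ?_, ?_, ?_⟩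
        · exact List.Sublist.trans
            (by rw [hsplit]; exact (List.sublist_cons_self e L2).append_left L1) hsub
        -- x's two incidences were intact; removing e leaves exactly A's next choice
        · have hends : (e.1 = curr ∧ e.2 = x) ∨ (e.1 = x ∧ e.2 = curr) := by
            by_cases h1 : e.1 = curr
            · exact Or.inl ⟨h1, by rw [← hBnext, if_pos h1]⟩
            · have h2 : e.2 = curr := by rcases hinc with h | h; exact absurd h h1; exact h
              exact Or.inr ⟨by rw [← hBnext, if_neg h1], h2⟩
          have hdegx : pvDeg edges x = 2 := by
            rcases hends with ⟨h1, h2⟩ | ⟨h1, h2⟩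
            · rw [← h2]; exact (H e heM).2
            · rw [← h1]; exact (H e heM).1
          have hlen2 : (pvNbrs x edges).length = 2 := by rw [pvNbrs_length, hdegx]
          obtain ⟨m0, m1, hm⟩ : ∃ m0 m1, pvNbrs x edges = [m0, m1] := by
            match hE : pvNbrs x edges with
            | [m0, m1] => exact ⟨m0, m1, rfl⟩
            | [] => rw [hE] at hlen2; simp at hlen2
            | [_] => rw [hE] at hlen2; simp at hlen2
            | _ :: _ :: _ :: _ => rw [hE] at hlen2; simp at hlen2
          have hincx : e.1 = x ∨ e.2 = x := by
            rcases hends with ⟨h1, h2⟩ | ⟨h1, h2⟩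
            · exact Or.inr h2
            · exact Or.inl h1
          have hxfull : pvNbrs x rem = [m0, m1] := by
            rcases hrest x hxc hxs with hfull | hnil
            · rw [hfull, hm]
            · exact absurd hnil (pvNbrs_ne_nil_of_mem x e rem hememrem hincx)
          -- e's x-incidence contributes exactly [curr]
          have heX : ((if e.1 = x then [e.2] else []) ++ (if e.2 = x then [e.1] else [])) = [curr] := by
            rcases hends with ⟨h1, h2⟩ | ⟨h1, h2⟩
            · have h1x : ¬ e.1 = x := by rw [h1]; exact fun h => hxc h.symm
              rw [if_neg h1x, if_pos h2, List.nil_append, h1]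
            · have h2x : ¬ e.2 = x := by rw [h2]; exact fun h => hxc h.symm
              rw [if_pos h1, if_neg h2x, List.append_nil, h2]
          have hxsplit : pvNbrs x L1 ++ ([curr] ++ pvNbrs x L2) = [m0, m1] := by
            rw [hsplit, pvNbrs_append, pvNbrs_cons, heX] at hxfull
            exact hxfull
          rw [pvNbrs_append]
          have hstep : pvStep edges curr x = if m0 ≠ curr then m0 else m1 := by
            rw [pvStep, hm]
            simp only [pvGet_zero, pvGet_one]
          rw [hstep]
          match hA1 : pvNbrs x L1 with
          | [] =>
            rw [hA1] at hxsplit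
            have h1 : curr = m0 ∧ pvNbrs x L2 = [m1] := by simpa using hxsplit
            rw [h1.2]
            simp [← h1.1]
          | [y] =>
            rw [hA1] at hxsplit
            have h1 : y = m0 ∧ curr = m1 ∧ pvNbrs x L2 = [] := by simpa using hxsplit
            rw [h1.2.2]
            by_cases hm0 : m0 = curr
            · simp [h1.1, hm0, ← h1.2.1]
            · simp [h1.1, hm0]
          | y :: z :: t =>
            exfalso
            rw [hA1] at hxsplit
            have hll := congrArg List.length hxsplit
            simp at hll
        -- every other node's incidence list is untouched by removing e
        · intro v hvx hvs
          by_cases hvc : v = curr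
          · right; subst hvc
            rw [pvNbrs_append, hL1, hL2, List.nil_append]
          · have hends : (e.1 = curr ∧ e.2 = x) ∨ (e.1 = x ∧ e.2 = curr) := by
              by_cases h1 : e.1 = curr
              · exact Or.inl ⟨h1, by rw [← hBnext, if_pos h1]⟩
              · have h2 : e.2 = curr := by rcases hinc with h | h; exact absurd h h1; exact h
                exact Or.inr ⟨by rw [← hBnext, if_neg h1], h2⟩
            have hv1 : ¬ e.1 = v := by rcases hends with ⟨h1, h2⟩ | ⟨h1, h2⟩ <;> omega
            have hv2 : ¬ e.2 = v := by rcases hends with ⟨h1, h2⟩ | ⟨h1, h2⟩ <;> omega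
            have hsame : pvNbrs v (L1 ++ L2) = pvNbrs v rem := by
              rw [hsplit, pvNbrs_append, pvNbrs_append, pvNbrs_cons, if_neg hv1, if_neg hv2]
              simp
            rw [hsame]
            exact hrest v hvc hvs

theorem get_cycle_nodes_spec : Claim_equal_get_cycle_nodes := by
  intro edges _ hpre
  unfold Spec_get_cycle_nodes
  obtain ⟨hnil, hcase⟩ := hpre
  match edges with
  | [] => exact absurd rfl hnil
  | (a, b) :: rest =>
    by_cases hab : a = b
    · -- first edge a self-loop: both loops stop immediately with [a, a]
      subst hab
      rw [get_cycle_nodes, get_cycle_nodes_alt]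
      have hn : pvNbrs a ((a, a) :: rest) = a :: a :: pvNbrs a rest := by
        rw [pvNbrs_cons]; simp
      rw [pvLookup_eq, hn, pvGet_zero, pvLoopA_start, pvLoopB_start]
    · -- a ≠ b: A's initial curr is b on both sides
      have hna : pvNbrs a ((a, b) :: rest) = b :: pvNbrs a rest := by
        rw [pvNbrs_cons]; simp [Ne.symm hab]
      have hnb : pvNbrs b ((a, b) :: rest) = a :: pvNbrs b rest := by
        rw [pvNbrs_cons]; simp [hab]
      rw [get_cycle_nodes, get_cycle_nodes_alt, pvLookup_eq, hna, pvGet_zero]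
      rcases hcase with h1 | h2 | h3
      · -- impossible: first edge not a self-loop
        exfalso; simp [List.head?] at h1; exact hab h1
      · -- degenerate [a, b, a] case: both do exactly one iteration
        simp only [List.head?, Option.any_some, beq_iff_eq] at h2
        obtain ⟨t, ht⟩ : ∃ t, pvNbrs b ((a, b) :: rest) = a :: a :: t := by
          match hE : pvNbrs b ((a, b) :: rest) with
          | [] => rw [hE] at h2; simp at h2
          | [w] => rw [hE] at h2; simp at h2
          | w :: w' :: t =>
            rw [hE] at h2; simp at h2
            exact ⟨t, by rw [h2.1, h2.2]⟩
        set F := (2 * ((a, b) :: rest).length + 2) * (2 * ((a, b) :: rest).length + 2) with hF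
        have hFpos : 0 < F := by
          rw [hF]; exact Nat.mul_pos (by omega) (by omega)
        obtain ⟨f, hf⟩ : ∃ f, F = f + 1 := ⟨F - 1, by omega⟩
        rw [hf]
        -- A: one step b → a, then stop
        have hAstep : pvLoopA (pvBuildNbr ((a, b) :: rest)) a (f + 1) a b [a] = [a, b, a] := by
          rw [pvLoopA, if_neg (fun h => hab h.symm)]
          simp only [pvLookup_eq, ht, pvGet_zero, pvGet_one, ite_self]
          rw [pvLoopA_start]
          rfl
        -- B: the first incident edge in rest leads back to a, then stop
        have hrestn : pvNbrs b rest = a :: t := by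
          rw [hnb] at ht
          exact (List.cons.injEq _ _ _ _).mp ht |>.2
        have hne : pvNbrs b rest ≠ [] := by rw [hrestn]; simp
        obtain ⟨L1, e, L2, hsplit, hext, hinc, hL1⟩ := pvExtract_spec b rest hne
        have hkey : ((if e.1 = b then [e.2] else []) ++ (if e.2 = b then [e.1] else [])) ++ pvNbrs b L2 = a :: t := by
          have hdecomp : pvNbrs b rest
              = pvNbrs b L1 ++ (((if e.1 = b then [e.2] else []) ++ (if e.2 = b then [e.1] else [])) ++ pvNbrs b L2) := by
            rw [hsplit, pvNbrs_append, pvNbrs_cons]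
          rw [hdecomp, hL1, List.nil_append] at hrestn
          exact hrestn
        have hBnext : (if e.1 = b then e.2 else e.1) = a := by
          by_cases k1 : e.1 = b <;> by_cases k2 : e.2 = b
          · exfalso
            rw [if_pos k1, if_pos k2] at hkey
            simp at hkey
            omega
          · rw [if_pos k1] at hkey ⊢
            rw [if_neg k2, List.append_nil, List.cons_append, List.cons.injEq] at hkey
            exact hkey.1
          · rw [if_neg k1] at hkey ⊢
            rw [if_pos k2, List.nil_append, List.cons_append, List.cons.injEq] at hkey
            exact hkey.1
          · exfalso; rcases hinc with h | h; exact k1 h; exact k2 h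
        rw [hAstep, pvLoopB, if_neg (fun h => hab h.symm), hext]
        show [a, b, a] = pvLoopB a f (if e.1 = b then e.2 else e.1) (L1 ++ L2) ([a] ++ [b])
        rw [hBnext, pvLoopB_start]
        rfl
      · -- the honest case: every node has degree 2; run the simulation
        apply pvLoop_eq ((a, b) :: rest) h3 a
        refine Or.inr ⟨fun h => hab h.symm, List.sublist_cons_self (a, b) rest, ?_, ?_⟩
        · have hdegb : pvDeg ((a, b) :: rest) b = 2 :=
            (h3 (a, b) List.mem_cons_self).2
          have hlenb : (pvNbrs b ((a, b) :: rest)).length = 2 := by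
            rw [pvNbrs_length, hdegb]
          rw [hnb] at hlenb
          obtain ⟨m1, hm1⟩ : ∃ m1, pvNbrs b rest = [m1] := by
            match hE : pvNbrs b rest with
            | [m1] => exact ⟨m1, rfl⟩
            | [] => rw [hE] at hlenb; simp at hlenb
            | _ :: _ :: _ => rw [hE] at hlenb; simp at hlenb
          rw [hm1, pvStep, hnb, hm1]
          simp [pvGet_zero, pvGet_one]
        · intro v hvb hva
          left
          have h1 : ¬ (a = v) := fun h => hva h.symm
          have h2 : ¬ (b = v) := fun h => hvb h.symm
          rw [pvNbrs_cons]
          simp [h1, h2]
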